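-- pv_equiv track=rewrite | github.com/leesunmin1231/Personal_python_practice | coding_test/모의고사.py | solution
-- ===== SOURCE A (Python) =====
-- def solution(answers):
--     arr1 = [1,2,3,4,5]
--     arr2 = [2,1,2,3,2,4,2,5]
--     arr3 = [3,3,1,1,2,2,4,4,5,5]
--     score = [0, 0, 0]
--     result = []
--
--     for idx in range(len(answers)):
--         if answers[idx] == arr1[idx%len(arr1)]:
--             score[0] += 1
--         if answers[idx] == arr2[idx%len(arr2)]:
--             score[1] += 1
--         if answers[idx] == arr3[idx%len(arr3)]:
--             score[2] += 1
--
--     for i in range(len(score)):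
--         if score[i] == max(score):
--             result.append(i+1)
--
--     return result
-- ===== SOURCE B (Python) =====
-- def solution(answers):
--     # Histogram approach: bucket the answers by (index mod 40, value) once
--     # (40 = lcm of the three pattern lengths), then score each pattern by
--     # summing 40 histogram cells instead of re-scanning the answers.
--     PERIOD = 40
--     cnt = {}
--     for i, a in enumerate(answers):
--         key = (i % PERIOD, a)
--         cnt[key] = cnt.get(key, 0) + 1
--     patterns = [[1, 2, 3, 4, 5],
--                 [2, 1, 2, 3, 2, 4, 2, 5],
--                 [3, 3, 1, 1, 2, 2, 4, 4, 5, 5]]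
--     scores = [sum(cnt.get((r, pat[r % len(pat)]), 0) for r in range(PERIOD))
--               for pat in patterns]
--     best = max(scores)
--     return [k + 1 for k, s in enumerate(scores) if s == best]
-- ===== Notes on version B (the rewrite author's own statement) =====
-- stated objective: alternative
-- what changed: Instead of comparing each answer against all three patterns in one combined pass, B builds a histogram (dict counter) of answers keyed by (index mod 40, value) in one pass, then computes each pattern's score by summing just 40 histogram cells; selection by max stays.
import Mathlib
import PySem

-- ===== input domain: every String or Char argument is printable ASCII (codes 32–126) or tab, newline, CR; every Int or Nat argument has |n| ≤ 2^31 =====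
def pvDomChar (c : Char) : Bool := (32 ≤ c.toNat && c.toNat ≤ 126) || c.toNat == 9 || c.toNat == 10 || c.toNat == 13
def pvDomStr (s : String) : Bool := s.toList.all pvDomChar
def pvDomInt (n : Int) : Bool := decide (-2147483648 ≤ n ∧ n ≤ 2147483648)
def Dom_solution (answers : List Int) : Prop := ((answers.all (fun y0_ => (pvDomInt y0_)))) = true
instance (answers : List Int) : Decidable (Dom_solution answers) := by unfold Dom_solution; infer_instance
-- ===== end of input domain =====

-- B replaces A's combined per-index comparison loop by a histogram: one pass
-- bucketing answers by (index mod 40, value), then each pattern's score is a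
-- sum of 40 histogram cells. Same O(n) cost; different algorithm/data structure.

-- ===== PORT A =====
def solution (answers : List Int) : List Int :=
  let arr1 : List Int := [1, 2, 3, 4, 5]
  let arr2 : List Int := [2, 1, 2, 3, 2, 4, 2, 5]
  let arr3 : List Int := [3, 3, 1, 1, 2, 2, 4, 4, 5, 5]
  -- score = [0,0,0], mutated in the loop: ported as a triple threaded through a fold
  let score : Int × Int × Int :=
    (PySem.List.pyRange 0 (PySem.List.len answers) 1).foldl
      (fun s idx =>
        (if PySem.List.pyGetD answers idx 0
              = PySem.List.pyGetD arr1 (PySem.Int.mod idx (PySem.List.len arr1)) 0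
         then s.1 + 1 else s.1,
         if PySem.List.pyGetD answers idx 0
              = PySem.List.pyGetD arr2 (PySem.Int.mod idx (PySem.List.len arr2)) 0
         then s.2.1 + 1 else s.2.1,
         if PySem.List.pyGetD answers idx 0
              = PySem.List.pyGetD arr3 (PySem.Int.mod idx (PySem.List.len arr3)) 0
         then s.2.2 + 1 else s.2.2))
      (0, 0, 0)
  let scoreL : List Int := [score.1, score.2.1, score.2.2]
  (PySem.List.pyRange 0 (PySem.List.len scoreL) 1).foldl
    (fun r i =>
      if PySem.List.pyGetD scoreL i 0 = (PySem.List.max? scoreL (fun y => y)).getD 0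
      then r ++ [i + 1] else r) []

-- ===== PORT B =====
def solution_alt (answers : List Int) : List Int :=
  let period : Int := 40
  -- cnt[key] = cnt.get(key, 0) + 1 over key = (i % 40, a): a counter-style dict fold
  let cnt : PySem.Dict (Int × Int) Int :=
    (PySem.List.enumerate answers 0).foldl
      (fun d p => d.modify (PySem.Int.mod p.1 period, p.2) 0 (· + 1)) PySem.Dict.empty
  let patterns : List (List Int) :=
    [[1, 2, 3, 4, 5], [2, 1, 2, 3, 2, 4, 2, 5], [3, 3, 1, 1, 2, 2, 4, 4, 5, 5]]
  let scores : List Int := patterns.map (fun pat =>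
    ((PySem.List.pyRange 0 period 1).map (fun r =>
        cnt.getD (r, PySem.List.pyGetD pat (PySem.Int.mod r (PySem.List.len pat)) 0) 0)).sum)
  let best : Int := (PySem.List.max? scores (fun y => y)).getD 0
  (PySem.List.enumerate scores 0).filterMap
    (fun p => if p.2 = best then some (p.1 + 1) else none)

-- ===== PRECONDITION & SPEC =====
def Spec_solution (answers : List Int) (out : List Int) : Prop := out = solution_alt answers
instance (answers : List Int) (out : List Int) : Decidable (Spec_solution answers out) := by unfold Spec_solution; infer_instance

-- ===== CLAIM (what is proved, stated in full; the proofs are below) =====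
def Claim_equal_solution : Prop := ∀ (answers : List Int), Dom_solution answers → Spec_solution answers (solution answers)

-- ===== LEMMAS AND PROOFS =====

-- one pair contributes to exactly one cell of the histogram row
theorem sum_indicator_unique (f : Int → Int) (p : Int × Int) :
    ∀ (R : List Int), p.1 ∈ R → R.Nodup →
      (R.map (fun r => if p == (r, f r) then (1 : Int) else 0)).sum
        = if p.2 = f p.1 then (1 : Int) else 0 := by
  intro R
  induction R with
  | nil => intro h; cases h
  | cons r R' ih =>
    intro hmem hnd
    rcases List.nodup_cons.mp hnd with ⟨hr, hnd'⟩
    simp only [List.map_cons, List.sum_cons]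
    by_cases h1 : p.1 = r
    · have hz : (R'.map (fun r => if p == (r, f r) then (1 : Int) else 0)).sum = 0 := by
        apply List.sum_eq_zero
        intro x hx
        rcases List.mem_map.mp hx with ⟨r', hr', rfl⟩
        have : ¬ (p == (r', f r')) = true := by
          intro hb
          have := (Prod.mk.injEq _ _ _ _ ▸ congrArg id (eq_of_beq hb))
          have h1' : p.1 = r' := by
            have := eq_of_beq hb; rw [this]
          exact hr (h1 ▸ h1' ▸ hr')
        simp [this]
      rw [hz]
      have : (p == (r, f r)) = (decide (p.2 = f p.1)) := by
        subst h1
        cases p with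
        | mk x y =>
          by_cases h2 : y = f x <;> simp [h2]
      rw [this]
      by_cases h2 : p.2 = f p.1 <;> simp [h2]
    · have hmem' : p.1 ∈ R' := by
        rcases List.mem_cons.mp hmem with h | h
        · exact absurd h h1
        · exact h
      have hhead : (p == (r, f r)) = false := by
        apply beq_eq_false_iff_ne.mpr
        intro he; exact h1 (congrArg Prod.fst he)
      rw [hhead]
      simpa using ih hmem' hnd'

-- summing one histogram row over a nodup index list counts the matching pairs
theorem sum_count_pairs (f : Int → Int) (R : List Int) (hR : R.Nodup) :
    ∀ (L : List (Int × Int)), (∀ p ∈ L, p.1 ∈ R) →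
      (R.map (fun r => ((L.count (r, f r) : Nat) : Int))).sum
        = (L.map (fun p => if p.2 = f p.1 then (1 : Int) else 0)).sum := by
  intro L
  induction L with
  | nil => intro _; simp
  | cons p t ih =>
    intro hmem
    have hrec := ih (fun q hq => hmem q (List.mem_cons_of_mem _ hq))
    have hcnt : ∀ r : Int, ((((p :: t).count (r, f r) : Nat)) : Int)
        = ((t.count (r, f r) : Nat) : Int) + (if p == (r, f r) then (1 : Int) else 0) := by
      intro r
      rw [List.count_cons]
      by_cases hb : (p == (r, f r)) = true <;> simp [hb]
    calc (R.map (fun r => (((p :: t).count (r, f r) : Nat) : Int))).sum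
        = (R.map (fun r => ((t.count (r, f r) : Nat) : Int)
            + (if p == (r, f r) then (1 : Int) else 0))).sum := by
          exact congrArg List.sum (List.map_congr_left (fun r _ => hcnt r))
      _ = (R.map (fun r => ((t.count (r, f r) : Nat) : Int))).sum
            + (R.map (fun r => if p == (r, f r) then (1 : Int) else 0)).sum := by
          rw [← List.sum_map_add]
      _ = (t.map (fun q => if q.2 = f q.1 then (1 : Int) else 0)).sum
            + (if p.2 = f p.1 then (1 : Int) else 0) := by
          rw [hrec, sum_indicator_unique f p R (hmem p (List.mem_cons_self)) hR]
      _ = ((p :: t).map (fun q => if q.2 = f q.1 then (1 : Int) else 0)).sum := by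
          simp [add_comm]
    
-- B's histogram score for one pattern equals the direct indicator sum over indices,
-- provided the pattern length divides 40
theorem hist_score_eq (answers pat : List Int) (hdvd : PySem.List.len pat ∣ (40 : Int))
    (hpos : 0 < PySem.List.len pat) :
    ((PySem.List.pyRange 0 40 1).map (fun r =>
        (((PySem.List.enumerate answers 0).foldl
            (fun d p => d.modify (PySem.Int.mod p.1 40, p.2) 0 (· + 1))
            PySem.Dict.empty).getD
          (r, PySem.List.pyGetD pat (PySem.Int.mod r (PySem.List.len pat)) 0) 0))).sum
    = ((PySem.List.pyRange 0 (PySem.List.len answers) 1).map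
        (fun j => if PySem.List.pyGetD answers j 0
            = PySem.List.pyGetD pat (PySem.Int.mod j (PySem.List.len pat)) 0
          then (1 : Int) else 0)).sum := by
  set f : Int → Int := fun r => PySem.List.pyGetD pat (PySem.Int.mod r (PySem.List.len pat)) 0 with hf
  set keys : List (Int × Int) :=
    (PySem.List.enumerate answers 0).map (fun p => (PySem.Int.mod p.1 40, p.2)) with hkeys
  have hgetD : ∀ v : Int × Int,
      ((PySem.List.enumerate answers 0).foldl
          (fun d p => d.modify (PySem.Int.mod p.1 40, p.2) 0 (· + 1)) PySem.Dict.empty).getD v 0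
        = ((keys.count v : Nat) : Int) := by
    intro v
    have h := List.foldl_map (f := fun p : Int × Int => (PySem.Int.mod p.1 40, p.2))
        (g := fun (d : PySem.Dict (Int × Int) Int) x => d.modify x 0 (· + 1))
        (l := PySem.List.enumerate answers 0) (init := PySem.Dict.empty)
    rw [hkeys, ← h, PySem.Dict.getD_foldl_modify_add_one]
    simp [PySem.Dict.empty, PySem.Dict.getD, PySem.Dict.get?]
  have hRnd : (PySem.List.pyRange 0 40 1).Nodup := by decide
  have hmem : ∀ p ∈ keys, p.1 ∈ PySem.List.pyRange 0 40 1 := by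
    intro p hp
    rcases List.mem_map.mp hp with ⟨q, _, rfl⟩
    have h0 : (0:Int) ≤ PySem.Int.mod q.1 40 := PySem.Int.mod_nonneg _ (by norm_num)
    have h1 : PySem.Int.mod q.1 40 < 40 := PySem.Int.mod_lt _ (by norm_num)
    exact (PySem.List.mem_pyRange_one).mpr ⟨h0, h1⟩
  calc ((PySem.List.pyRange 0 40 1).map (fun r =>
          ((PySem.List.enumerate answers 0).foldl
            (fun d p => d.modify (PySem.Int.mod p.1 40, p.2) 0 (· + 1))
            PySem.Dict.empty).getD (r, f r) 0)).sum
      = ((PySem.List.pyRange 0 40 1).map (fun r => ((keys.count (r, f r) : Nat) : Int))).sum := by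
        exact congrArg List.sum (List.map_congr_left (fun r _ => hgetD (r, f r)))
    _ = (keys.map (fun p => if p.2 = f p.1 then (1 : Int) else 0)).sum :=
        sum_count_pairs f _ hRnd keys hmem
    _ = ((PySem.List.enumerate answers 0).map
          (fun q => if q.2 = f (PySem.Int.mod q.1 40) then (1 : Int) else 0)).sum := by
        rw [hkeys, List.map_map]; rfl
    _ = ((PySem.List.enumerate answers 0).map
          (fun q => if q.2 = f q.1 then (1 : Int) else 0)).sum := by
        refine congrArg List.sum (List.map_congr_left (fun q hq => ?_))
        have : f (PySem.Int.mod q.1 40) = f q.1 := by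
          rw [hf]
          have h40 : PySem.Int.mod q.1 40 = q.1 % 40 := PySem.Int.mod_eq_emod_of_pos (by norm_num)
          have hm : ∀ a : Int, PySem.Int.mod a (PySem.List.len pat) = a % PySem.List.len pat :=
            fun a => PySem.Int.mod_eq_emod_of_pos hpos
          simp only [h40, hm]
          rw [Int.emod_emod_of_dvd _ hdvd]
        rw [this]
    _ = ((PySem.List.pyRange 0 (PySem.List.len answers) 1).map
          (fun j => if PySem.List.pyGetD answers j 0 = f j then (1 : Int) else 0)).sum := by
        rw [PySem.List.enumerate_eq_map_pyRange answers 0, List.map_map]; rfl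

-- A's combined triple-state fold splits into three independent indicator sums
theorem foldl_triple (c1 c2 c3 : Int → Prop) [DecidablePred c1] [DecidablePred c2]
    [DecidablePred c3] (l : List Int) (s : Int × Int × Int) :
    l.foldl (fun s idx =>
        (if c1 idx then s.1 + 1 else s.1,
         if c2 idx then s.2.1 + 1 else s.2.1,
         if c3 idx then s.2.2 + 1 else s.2.2)) s
    = (s.1 + (l.map (fun x => if c1 x then (1 : Int) else 0)).sum,
       s.2.1 + (l.map (fun x => if c2 x then (1 : Int) else 0)).sum,
       s.2.2 + (l.map (fun x => if c3 x then (1 : Int) else 0)).sum) := by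
  induction l generalizing s with
  | nil => simp
  | cons x t ih =>
    rw [List.foldl_cons, ih]
    simp only [List.map_cons, List.sum_cons]
    split_ifs <;> simp [add_assoc]

-- A's selection loop equals B's filterMap selection, for any three scores
theorem sel_eq (s0 s1 s2 : Int) :
    (PySem.List.pyRange 0 (PySem.List.len [s0, s1, s2]) 1).foldl
      (fun r i =>
        if PySem.List.pyGetD [s0, s1, s2] i 0
            = (PySem.List.max? [s0, s1, s2] (fun y => y)).getD 0
        then r ++ [i + 1] else r) []
    = (PySem.List.enumerate [s0, s1, s2] 0).filterMap
        (fun p => if p.2 = (PySem.List.max? [s0, s1, s2] (fun y => y)).getD 0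
                  then some (p.1 + 1) else none) := by
  have hl : PySem.List.len [s0, s1, s2] = 3 := by simp
  have h3 : PySem.List.pyRange 0 (3 : Int) 1 = [0, 1, 2] := by decide
  rw [hl, h3]
  simp only [PySem.List.enumerate_cons, PySem.List.enumerate_nil, List.foldl, List.filterMap,
    PySem.List.max?_id_cons, PySem.List.pyGetD_zero_cons]
  have h1 : PySem.List.pyGetD [s0, s1, s2] 1 0 = s1 := by
    simp [PySem.List.pyGetD, PySem.List.pyGet?, PySem.List.pyIdx?]
  have h2 : PySem.List.pyGetD [s0, s1, s2] 2 0 = s2 := by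
    simp [PySem.List.pyGetD, PySem.List.pyGet?, PySem.List.pyIdx?]
  rw [h1, h2]
  split_ifs <;> rfl

theorem solution_eq (answers : List Int) : solution answers = solution_alt answers := by
  unfold solution solution_alt
  dsimp only
  rw [foldl_triple]
  simp only [List.map_cons, List.map_nil, zero_add]
  rw [← hist_score_eq answers [1,2,3,4,5] (by decide) (by decide),
      ← hist_score_eq answers [2,1,2,3,2,4,2,5] (by decide) (by decide),
      ← hist_score_eq answers [3,3,1,1,2,2,4,4,5,5] (by decide) (by decide)]
  exact sel_eq _ _ _

-- ===== VERDICT (by name: the statement is the Claim_ definition above) =====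
theorem solution_spec : Claim_equal_solution := by
  intro answers _
  unfold Spec_solution
  exact solution_eq answers
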